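-- pv_equiv track=rewrite | github.com/anhvanthe/song-lyrics | Kanye analysis.py | remove_common_words
-- ===== SOURCE A (Python) =====
-- common_words =['and', 'a', 'an', 'the', 'that', 'this', '', 'of',
--                'in', 'for', 'at', 'it', 'to', 'the,', 'is' ]
--
-- def remove_common_words(words):
--     running = True
--     while running:
--         for i in words:
--             if i in common_words:
--                 words.remove(i)
--         if any(x in common_words for x in words):
--             pass
--         else:
--             running = False
--     return words
-- ===== SOURCE B (Python) =====
-- common_words =['and', 'a', 'an', 'the', 'that', 'this', '', 'of',
--                'in', 'for', 'at', 'it', 'to', 'the,', 'is' ]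
--
-- def remove_common_words(words):
--     # single-pass in-place compaction with a write index (same list object mutated)
--     j = 0
--     for word in words:
--         if word not in common_words:
--             words[j] = word
--             j += 1
--     del words[j:]
--     return words
-- ===== Notes on version B (the rewrite author's own statement) =====
-- stated objective: faster
-- what changed: Replaced the repeat-until-stable scan-and-remove with list.remove (mutating while iterating) by a single linear pass with a write index that compacts kept words in place and truncates the tail.
import Mathlib
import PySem

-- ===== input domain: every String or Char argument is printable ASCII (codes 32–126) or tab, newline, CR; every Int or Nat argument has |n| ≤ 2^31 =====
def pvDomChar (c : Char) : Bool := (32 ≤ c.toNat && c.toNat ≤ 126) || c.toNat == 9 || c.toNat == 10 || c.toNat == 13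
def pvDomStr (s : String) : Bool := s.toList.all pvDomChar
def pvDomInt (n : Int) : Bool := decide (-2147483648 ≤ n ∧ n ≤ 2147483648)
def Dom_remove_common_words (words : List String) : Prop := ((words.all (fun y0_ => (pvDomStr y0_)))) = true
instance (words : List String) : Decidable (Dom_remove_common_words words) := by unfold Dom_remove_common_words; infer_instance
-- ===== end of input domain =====

-- B replaces A's repeat-until-stable scan-and-remove with one in-place compaction pass
-- (both Pythons mutate the argument list; equivalence proved here is about the return value).
-- B replaces A's repeat-until-stable scan-and-remove with one in-place compaction pass
-- (both Pythons mutate the argument list; equivalence proved here is about the return value).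
-- ===== PORT A =====
def pvCommon : List String := ["and", "a", "an", "the", "that", "this", "", "of",
               "in", "for", "at", "it", "to", "the,", "is"]

-- `for i in words: if i in common: words.remove(i)` -- Python's for advances an internal
-- index k over the mutating list; remove = erase first occurrence. The structural fuel
-- argument starts at ws.length and is provably sufficient (ws.length - k shrinks each step).
def pvPassGo : Nat → List String → Nat → List String
  | 0, ws, _ => ws
  | n+1, ws, k =>
    if h : k < ws.length then
      let i := ws[k]
      if pvCommon.contains i then pvPassGo n (ws.erase i) (k+1) else pvPassGo n ws (k+1)
    else ws

def pvPass (ws : List String) : List String := pvPassGo ws.length ws 0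

-- the `while running:` loop; each round runs the pass and re-tests for any common word.
-- Fuel countP + 1 is provably sufficient: each retried round removes at least one common word.
def pvOuterGo : Nat → List String → List String
  | 0, ws => ws
  | n+1, ws =>
    let ws' := pvPass ws
    if ws'.any pvCommon.contains then pvOuterGo n ws' else ws'

def remove_common_words (words : List String) : List String :=
  pvOuterGo (words.countP pvCommon.contains + 1) words

-- ===== PORT B =====
-- the compaction loop: read index i, write index j; words[j] = word; finally del words[j:].
-- Fuel ws.length is exactly the number of loop iterations.
def pvCompactGo : Nat → List String → Nat → Nat → List String × Nat
  | 0, ws, _, j => (ws, j)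
  | n+1, ws, i, j =>
    if h : i < ws.length then
      let word := ws[i]
      if pvCommon.contains word then pvCompactGo n ws (i+1) j
      else pvCompactGo n (ws.set j word) (i+1) (j+1)
    else (ws, j)

def remove_common_words_alt (words : List String) : List String :=
  let r := pvCompactGo words.length words 0 0
  r.1.take r.2

-- ===== PRECONDITION & SPEC =====
def Spec_remove_common_words (words : List String) (out : List String) : Prop := out = remove_common_words_alt words
instance (words : List String) (out : List String) : Decidable (Spec_remove_common_words words out) := by unfold Spec_remove_common_words; infer_instance

-- ===== CLAIM (what is proved, stated in full; the proofs are below) =====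
def Claim_equal_remove_common_words : Prop := ∀ (words : List String), Dom_remove_common_words words → Spec_remove_common_words words (remove_common_words words)

-- ===== LEMMAS AND PROOFS =====

theorem pvPassGo_countP_le (n : Nat) : ∀ (ws : List String) (k : Nat),
    (pvPassGo n ws k).countP pvCommon.contains ≤ ws.countP pvCommon.contains := by
  induction n with
  | zero => intro ws k; exact Nat.le_refl _
  | succ n ih =>
    intro ws k
    rw [pvPassGo]
    by_cases hk : k < ws.length
    · rw [dif_pos hk]
      by_cases hc : pvCommon.contains (ws[k]) = true
      · rw [if_pos hc]
        exact le_trans (ih _ _) (List.erase_sublist).countP_le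
      · rw [if_neg hc]
        exact ih _ _
    · rw [dif_neg hk]

theorem pvPassGo_countP_lt (n : Nat) : ∀ (ws : List String) (k : Nat),
    ws.length ≤ n + k → 0 < (ws.drop k).countP pvCommon.contains →
    (pvPassGo n ws k).countP pvCommon.contains < ws.countP pvCommon.contains := by
  induction n with
  | zero =>
    intro ws k hlen h
    exfalso
    rw [List.drop_eq_nil_of_le (by omega)] at h
    simp at h
  | succ n ih =>
    intro ws k hlen h
    rw [pvPassGo]
    by_cases hk : k < ws.length
    · rw [dif_pos hk]
      by_cases hc : pvCommon.contains (ws[k]) = true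
      · rw [if_pos hc]
        have hmem : ws[k] ∈ ws := List.getElem_mem hk
        have hperm := (List.perm_cons_erase hmem).countP_eq (p := pvCommon.contains)
        rw [List.countP_cons, hc] at hperm
        simp at hperm
        have hle := pvPassGo_countP_le n (ws.erase ws[k]) (k+1)
        omega
      · rw [if_neg hc]
        apply ih _ _ (by omega)
        have hc' : pvCommon.contains (ws[k]) = false := by simpa using hc
        rw [List.drop_eq_getElem_cons hk, List.countP_cons, hc'] at h
        simp only [Bool.false_eq_true, if_false, Nat.add_zero] at h
        exact h
    · exfalso
      rw [List.drop_eq_nil_of_le (by omega)] at h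
      simp at h

theorem filter_erase_neg {α : Type} [BEq α] [LawfulBEq α] (p : α → Bool) (a : α)
    (ha : p a = false) (l : List α) : (l.erase a).filter p = l.filter p := by
  induction l with
  | nil => rfl
  | cons b bs ih =>
    rw [List.erase_cons]
    by_cases hba : b = a
    · subst hba
      simp [ha]
    · rw [if_neg (by simp [hba])]
      simp only [List.filter_cons]
      rw [ih]

theorem pvPassGo_filter (n : Nat) : ∀ (ws : List String) (k : Nat),
    (pvPassGo n ws k).filter (fun w => !pvCommon.contains w)
      = ws.filter (fun w => !pvCommon.contains w) := by
  induction n with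
  | zero => intro ws k; rfl
  | succ n ih =>
    intro ws k
    rw [pvPassGo]
    by_cases hk : k < ws.length
    · rw [dif_pos hk]
      by_cases hc : pvCommon.contains (ws[k]) = true
      · rw [if_pos hc]
        rw [ih, filter_erase_neg _ _ (by simp only [hc, Bool.not_true]) ws]
      · rw [if_neg hc]
        exact ih _ _
    · rw [dif_neg hk]

theorem pvOuterGo_eq_filter (n : Nat) : ∀ (ws : List String),
    ws.countP pvCommon.contains < n →
    pvOuterGo n ws = ws.filter (fun w => !pvCommon.contains w) := by
  induction n with
  | zero => intro ws h; omega
  | succ n ih =>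
    intro ws h
    rw [pvOuterGo]
    by_cases hany : (pvPass ws).any pvCommon.contains = true
    · rw [if_pos hany]
      have hpos : 0 < (pvPass ws).countP pvCommon.contains := by
        rcases List.any_eq_true.mp hany with ⟨x, hx, hpx⟩
        exact List.countP_pos_iff.mpr ⟨x, hx, hpx⟩
      have hlt : (pvPass ws).countP pvCommon.contains < ws.countP pvCommon.contains := by
        apply pvPassGo_countP_lt ws.length ws 0 (by omega)
        have hle := pvPassGo_countP_le ws.length ws 0
        rw [List.drop_zero]
        exact lt_of_lt_of_le hpos (le_trans hle (Nat.le_refl _))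
      rw [ih _ (by omega), pvPass, pvPassGo_filter]
    · rw [if_neg hany]
      have hall : ∀ x ∈ pvPass ws, (!pvCommon.contains x) = true := by
        intro x hx
        simp only [Bool.not_eq_eq_eq_not, Bool.not_true]
        by_contra hcx
        exact hany (List.any_eq_true.mpr ⟨x, hx, by simpa using hcx⟩)
      rw [← List.filter_eq_self.mpr hall, pvPass, pvPassGo_filter]

theorem pvCompactGo_take (n : Nat) : ∀ (ws : List String) (i j : Nat),
    j ≤ i → ws.length ≤ n + i → i ≤ ws.length →
    (pvCompactGo n ws i j).1.take (pvCompactGo n ws i j).2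
      = ws.take j ++ (ws.drop i).filter (fun w => !pvCommon.contains w) := by
  induction n with
  | zero =>
    intro ws i j hji hn hi
    have : i = ws.length := by omega
    subst this
    simp [pvCompactGo]
  | succ n ih =>
    intro ws i j hji hn hi
    rw [pvCompactGo]
    by_cases hk : i < ws.length
    · rw [dif_pos hk]
      by_cases hc : pvCommon.contains (ws[i]) = true
      · rw [if_pos hc]
        rw [ih _ _ _ (Nat.le_succ_of_le hji) (by omega) hk]
        rw [List.drop_eq_getElem_cons hk]
        have hc' : ws[i] ∈ pvCommon := by simpa using hc
        rw [List.filter_cons_of_neg (by simp [hc'])]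
      · rw [if_neg hc]
        have hj : j < ws.length := lt_of_le_of_lt hji hk
        rw [ih _ _ _ (Nat.succ_le_succ hji) (by simp; omega) (by simp; omega)]
        have hlen : (ws.take j).length = j := by simp; omega
        have hset : ws.set j (ws[i]) = ws.take j ++ ws[i] :: ws.drop (j+1) :=
          List.set_eq_take_cons_drop _ hj
        have htake : (ws.set j (ws[i])).take (j+1) = ws.take j ++ [ws[i]] := by
          rw [hset, List.take_append, hlen]
          rw [List.take_of_length_le (by rw [hlen]; omega)]
          simp
        have hdrop : (ws.set j (ws[i])).drop (i+1) = ws.drop (i+1) :=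
          List.drop_set_of_lt (Nat.lt_succ_of_le hji)
        rw [htake, hdrop, List.drop_eq_getElem_cons hk]
        have hc' : ¬ ws[i] ∈ pvCommon := by simpa using hc
        rw [List.filter_cons_of_pos (by simp [hc'])]
        simp
    · rw [dif_neg hk]
      have : i = ws.length := by omega
      subst this
      simp

theorem alt_eq_filter_final (ws : List String) :
    remove_common_words_alt ws = ws.filter (fun w => !pvCommon.contains w) := by
  unfold remove_common_words_alt
  have := pvCompactGo_take ws.length ws 0 0 (Nat.le_refl 0) (by omega) (Nat.zero_le _)
  simpa using this

-- ===== VERDICT (by name: the statement is the Claim_ definition above) =====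
theorem remove_common_words_spec : Claim_equal_remove_common_words := by
  intro words _
  unfold Spec_remove_common_words
  rw [alt_eq_filter_final, remove_common_words, pvOuterGo_eq_filter _ _ (Nat.lt_succ_self _)]
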